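-- pv_equiv track=rewrite | github.com/luolinhan/investment-decision-system | app/services/lead_lag_service.py | _split_batons
-- ===== SOURCE A (Python) =====
-- from typing import Any, Dict, Iterable, List, Optional
--
-- BATON_ORDER = ("first_baton", "second_baton", "next_baton")
--
-- def _split_batons(items: List[Dict[str, Any]]) -> Dict[str, List[Dict[str, Any]]]:
--     buckets: Dict[str, List[Dict[str, Any]]] = {name: [] for name in BATON_ORDER}
--     buckets["invalidated"] = []
--     baton_slots = ("first_baton", "second_baton", "next_baton")
--     non_invalidated_rank = 0
--     for item in items:
--         if item.get("stage") == "invalidated":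
--             item["baton"] = "blocked"
--             buckets["invalidated"].append(item)
--             continue
--
--         if non_invalidated_rank == 0:
--             baton = baton_slots[0]
--         elif non_invalidated_rank < 3:
--             baton = baton_slots[1]
--         else:
--             baton = baton_slots[2]
--         item["baton"] = baton.replace("_", "-")
--         buckets[baton].append(item)
--         non_invalidated_rank += 1
--     return buckets
-- ===== SOURCE B (Python) =====
-- from typing import Any, Dict, List
--
--
-- def _split_batons(items: List[Dict[str, Any]]) -> Dict[str, List[Dict[str, Any]]]:
--     invalidated = [it for it in items if it.get("stage") == "invalidated"]
--     valid = [it for it in items if it.get("stage") != "invalidated"]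
--     for it in invalidated:
--         it["baton"] = "blocked"
--     for it in valid[:1]:
--         it["baton"] = "first-baton"
--     for it in valid[1:3]:
--         it["baton"] = "second-baton"
--     for it in valid[3:]:
--         it["baton"] = "next-baton"
--     return {
--         "first_baton": valid[:1],
--         "second_baton": valid[1:3],
--         "next_baton": valid[3:],
--         "invalidated": invalidated,
--     }
-- ===== Notes on version B (the rewrite author's own statement) =====
-- stated objective: simpler
-- what changed: Replaces A's single loop with a running rank counter and per-item branch by a one-pass partition into invalidated/valid lists followed by slicing the valid list (valid[:1], valid[1:3], valid[3:]) to form the three baton buckets directly.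
import Mathlib
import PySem

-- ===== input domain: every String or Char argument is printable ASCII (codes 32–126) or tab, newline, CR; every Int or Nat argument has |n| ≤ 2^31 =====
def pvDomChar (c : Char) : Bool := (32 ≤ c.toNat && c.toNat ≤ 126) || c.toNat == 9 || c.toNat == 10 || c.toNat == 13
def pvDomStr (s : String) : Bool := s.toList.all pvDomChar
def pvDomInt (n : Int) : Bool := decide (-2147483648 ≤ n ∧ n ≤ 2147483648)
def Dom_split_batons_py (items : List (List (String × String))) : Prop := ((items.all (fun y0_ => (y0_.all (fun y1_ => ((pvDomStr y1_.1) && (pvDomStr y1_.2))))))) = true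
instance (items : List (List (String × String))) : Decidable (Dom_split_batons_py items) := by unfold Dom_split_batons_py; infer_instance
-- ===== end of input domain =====

-- B partitions the items once and assigns batons by slicing the valid list (no running rank counter);
-- objective: simpler.  Like A, the Python B mutates the item dicts in place (same mutations);
-- the equivalence proved here is about the return value.

-- ===== PORT A =====
-- transliteration of A's single loop: a buckets dict plus a running non_invalidated_rank
def stepA (st : PySem.Dict String (List (List (String × String))) × Nat)
    (itemL : List (String × String)) :
    PySem.Dict String (List (List (String × String))) × Nat :=
  let item := PySem.Dict.ofList itemL
  if item.get? "stage" == some "invalidated" then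
    let item := item.insert "baton" "blocked"
    (st.1.modify "invalidated" [] (· ++ [item.items]), st.2)
  else
    let baton :=
      if st.2 == 0 then "first_baton"
      else if st.2 < 3 then "second_baton"
      else "next_baton"
    let item := item.insert "baton" (PySem.Str.replace baton "_" "-")
    (st.1.modify baton [] (· ++ [item.items]), st.2 + 1)

def split_batons_py (items : List (List (String × String))) :
    List (String × List (List (String × String))) :=
  let buckets0 : PySem.Dict String (List (List (String × String))) :=
    (PySem.Dict.ofList ((["first_baton", "second_baton", "next_baton"]).map
      (fun name => (name, ([] : List (List (String × String))))))).insert "invalidated" []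
  (items.foldl stepA (buckets0, 0)).1.items

-- ===== PORT B =====
def isInvB (itemL : List (String × String)) : Bool :=
  (PySem.Dict.ofList itemL).get? "stage" == some "invalidated"

def tagB (label : String) (itemL : List (String × String)) : List (String × String) :=
  ((PySem.Dict.ofList itemL).insert "baton" label).items

def split_batons_py_alt (items : List (List (String × String))) :
    List (String × List (List (String × String))) :=
  let invalidated := (items.filter (fun it => isInvB it)).map (tagB "blocked")
  let valid := items.filter (fun it => !isInvB it)
  [("first_baton", (PySem.List.slice valid none (some 1)).map (tagB "first-baton")),
   ("second_baton", (PySem.List.slice valid (some 1) (some 3)).map (tagB "second-baton")),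
   ("next_baton", (PySem.List.slice valid (some 3) none).map (tagB "next-baton")),
   ("invalidated", invalidated)]

-- ===== PRECONDITION & SPEC =====
def Spec_split_batons_py (items : List (List (String × String))) (out : List (String × List (List (String × String)))) : Prop := out = split_batons_py_alt items
instance (items : List (List (String × String))) (out : List (String × List (List (String × String)))) : Decidable (Spec_split_batons_py items out) := by unfold Spec_split_batons_py; infer_instance

-- ===== CLAIM (what is proved, stated in full; the proofs are below) =====
def Claim_equal_split_batons_py : Prop := ∀ (items : List (List (String × String))), Dom_split_batons_py items → Spec_split_batons_py items (split_batons_py items)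

-- ===== LEMMAS AND PROOFS =====

-- the concrete 4-key buckets dict A maintains
def mkB (f s n i : List (List (String × String))) :
    PySem.Dict String (List (List (String × String))) :=
  PySem.Dict.mk [("first_baton", f), ("second_baton", s), ("next_baton", n), ("invalidated", i)]

theorem modify_first (f s n i : List (List (String × String))) (g) :
    (mkB f s n i).modify "first_baton" [] g = mkB (g f) s n i := rfl
theorem modify_second (f s n i : List (List (String × String))) (g) :
    (mkB f s n i).modify "second_baton" [] g = mkB f (g s) n i := rfl
theorem modify_next (f s n i : List (List (String × String))) (g) :
    (mkB f s n i).modify "next_baton" [] g = mkB f s (g n) i := rfl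
theorem modify_inv (f s n i : List (List (String × String))) (g) :
    (mkB f s n i).modify "invalidated" [] g = mkB f s n (g i) := rfl

theorem rep_first : PySem.Str.replace "first_baton" "_" "-" = "first-baton" := by decide
theorem rep_second : PySem.Str.replace "second_baton" "_" "-" = "second-baton" := by decide
theorem rep_next : PySem.Str.replace "next_baton" "_" "-" = "next-baton" := by decide

-- what A's loop appends to each slot when started at rank r, over the VALID items only
def slotTag (r : Nat) (x : List (String × String)) : List (String × String) :=
  if r == 0 then tagB "first-baton" x
  else if r < 3 then tagB "second-baton" x
  else tagB "next-baton" x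

def slotIs (slot : String) (r : Nat) : Bool :=
  (if r == 0 then "first_baton" else if r < 3 then "second_baton" else "next_baton") == slot

def collectV (slot : String) (r : Nat) : List (List (String × String)) → List (List (String × String))
  | [] => []
  | x :: xs => (if slotIs slot r then [slotTag r x] else []) ++ collectV slot (r + 1) xs

theorem foldA_inv (items : List (List (String × String))) :
    ∀ (r : Nat) (f s n i : List (List (String × String))),
      items.foldl stepA (mkB f s n i, r) =
        (mkB (f ++ collectV "first_baton" r (items.filter (fun it => !isInvB it)))
             (s ++ collectV "second_baton" r (items.filter (fun it => !isInvB it)))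
             (n ++ collectV "next_baton" r (items.filter (fun it => !isInvB it)))
             (i ++ ((items.filter (fun it => isInvB it)).map (tagB "blocked"))),
         r + (items.filter (fun it => !isInvB it)).length) := by
  induction items with
  | nil => intro r f s n i; simp [collectV]
  | cons x xs ih =>
    intro r f s n i
    by_cases hx : isInvB x = true
    · simp only [List.foldl_cons, List.filter_cons, hx]
      have hstep : stepA (mkB f s n i, r) x = (mkB f s n (i ++ [tagB "blocked" x]), r) := by
        simp only [stepA, isInvB, tagB] at hx ⊢
        rw [if_pos hx, modify_inv]
      rw [hstep, ih]
      simp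
    · simp only [List.foldl_cons, List.filter_cons, hx]
      have hb : isInvB x = false := by simpa using hx
      have hstep : stepA (mkB f s n i, r) x =
          (if r = 0 then (mkB (f ++ [slotTag r x]) s n i, r + 1)
           else if r < 3 then (mkB f (s ++ [slotTag r x]) n i, r + 1)
           else (mkB f s (n ++ [slotTag r x]) i, r + 1)) := by
        simp only [stepA, isInvB] at hb ⊢
        rw [if_neg (by simp [hb])]
        by_cases h0 : r = 0
        · subst h0
          simp [rep_first, modify_first, slotTag, tagB]
        · have hne : (r == 0) = false := by simpa using h0
          by_cases h3 : r < 3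
          · simp [h0, hne, h3, rep_second, modify_second, slotTag, tagB]
          · simp [h0, hne, h3, rep_next, modify_next, slotTag, tagB]
      rw [hstep]
      by_cases h0 : r = 0
      · subst h0
        rw [if_pos rfl, ih]
        simp [collectV, slotIs, Nat.add_comm]
      · rw [if_neg h0]
        by_cases h3 : r < 3
        · rw [if_pos h3, ih]
          simp [collectV, slotIs, h0, h3, Nat.add_comm, Nat.add_assoc]
        · rw [if_neg h3, ih]
          simp [collectV, slotIs, h0, h3, Nat.add_comm, Nat.add_assoc]

-- collectV at the three slots, for ranks past the slot
theorem collectV_first_ge1 (v : List (List (String × String))) :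
    ∀ r : Nat, 1 ≤ r → collectV "first_baton" r v = [] := by
  induction v with
  | nil => intro r _; rfl
  | cons x xs ih =>
    intro r hr
    have h0 : (r == 0) = false := by simpa using (by omega : ¬ r = 0)
    by_cases h3 : r < 3 <;>
      simp [collectV, slotIs, h0, h3, ih (r + 1) (by omega)]

theorem collectV_second_ge3 (v : List (List (String × String))) :
    ∀ r : Nat, 3 ≤ r → collectV "second_baton" r v = [] := by
  induction v with
  | nil => intro r _; rfl
  | cons x xs ih =>
    intro r hr
    have h0 : (r == 0) = false := by simpa using (by omega : ¬ r = 0)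
    simp [collectV, slotIs, h0, (show ¬ r < 3 by omega), ih (r + 1) (by omega)]

theorem collectV_next_ge3 (v : List (List (String × String))) :
    ∀ r : Nat, 3 ≤ r → collectV "next_baton" r v = v.map (tagB "next-baton") := by
  induction v with
  | nil => intro r _; rfl
  | cons x xs ih =>
    intro r hr
    have h0 : (r == 0) = false := by simpa using (by omega : ¬ r = 0)
    simp [collectV, slotIs, slotTag, h0, (show ¬ r < 3 by omega), ih (r + 1) (by omega)]

theorem collectV_first (v : List (List (String × String))) :
    collectV "first_baton" 0 v = (v.take 1).map (tagB "first-baton") := by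
  cases v with
  | nil => rfl
  | cons x xs =>
    simp [collectV, slotIs, slotTag, collectV_first_ge1 xs 1 (by omega)]

theorem collectV_second (v : List (List (String × String))) :
    collectV "second_baton" 0 v = ((v.drop 1).take 2).map (tagB "second-baton") := by
  match v with
  | [] => rfl
  | [x] => simp [collectV, slotIs]
  | [x, y] => simp [collectV, slotIs, slotTag]
  | x :: y :: z :: rest =>
    simp [collectV, slotIs, slotTag, collectV_second_ge3 rest 3 (by omega)]

theorem collectV_next (v : List (List (String × String))) :
    collectV "next_baton" 0 v = (v.drop 3).map (tagB "next-baton") := by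
  match v with
  | [] => rfl
  | [x] => simp [collectV, slotIs]
  | [x, y] => simp [collectV, slotIs]
  | x :: y :: z :: rest =>
    simp [collectV, slotIs, collectV_next_ge3 rest 3 (by omega)]

-- ===== VERDICT (by name: the statement is the Claim_ definition above) =====
theorem split_batons_py_spec : Claim_equal_split_batons_py := by
  intro items _
  unfold Spec_split_batons_py
  show split_batons_py items = split_batons_py_alt items
  have hb0 : (PySem.Dict.ofList ((["first_baton", "second_baton", "next_baton"]).map
      (fun name => (name, ([] : List (List (String × String))))))).insert "invalidated" ([] : List (List (String × String))) = mkB [] [] [] [] := by decide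
  simp only [split_batons_py, split_batons_py_alt]
  rw [hb0, foldA_inv items 0 [] [] [] []]
  simp [pysem, mkB, collectV_first, collectV_second, collectV_next]
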